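-- pv_equiv track=rewrite | github.com/AlejandraVelascoSanchezVillares/Clustering-Coefficient | ClusteringCoefficientAPriori.py | find_neighbourhoods_edges
-- ===== SOURCE A (Python) =====
-- def find_neighbourhoods_edges (vecinitos, contenido_data):
--     neighbourhoods_edges = []
--     for i in range(len(vecinitos)):
--         neighbourhood_edges = 0
--         for k in range(len(contenido_data)):
--             if contenido_data[k][0] in vecinitos[i]:
--                 if contenido_data[k][1] in vecinitos[i]:
--                     neighbourhood_edges += 1
--         neighbourhoods_edges.append(neighbourhood_edges)
--     return(neighbourhoods_edges)
-- ===== SOURCE B (Python) =====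
-- def find_neighbourhoods_edges(vecinitos, contenido_data):
--     # Inverted index: vertex -> set of neighbourhood indices containing it.
--     index = {}
--     for j, nb in enumerate(vecinitos):
--         for v in nb:
--             index.setdefault(v, set()).add(j)
--     counts = [0] * len(vecinitos)
--     for edge in contenido_data:
--         su = index.get(edge[0], set())
--         sv = index.get(edge[1], set())
--         for j in su:
--             if j in sv:
--                 counts[j] += 1
--     return counts
-- ===== Notes on version B (the rewrite author's own statement) =====
-- stated objective: faster
-- what changed: Replaces the neighbourhood-by-neighbourhood rescan of the whole edge list by a one-pass inverted index (vertex -> set of neighbourhood indices) and a single pass over the edges that increments a counts vector at the intersection of the two endpoint entries.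
-- outside the precondition, e.g. on find_neighbourhoods_edges([[1]], [[2]]): A returns [0], B raises IndexError
import Mathlib
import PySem

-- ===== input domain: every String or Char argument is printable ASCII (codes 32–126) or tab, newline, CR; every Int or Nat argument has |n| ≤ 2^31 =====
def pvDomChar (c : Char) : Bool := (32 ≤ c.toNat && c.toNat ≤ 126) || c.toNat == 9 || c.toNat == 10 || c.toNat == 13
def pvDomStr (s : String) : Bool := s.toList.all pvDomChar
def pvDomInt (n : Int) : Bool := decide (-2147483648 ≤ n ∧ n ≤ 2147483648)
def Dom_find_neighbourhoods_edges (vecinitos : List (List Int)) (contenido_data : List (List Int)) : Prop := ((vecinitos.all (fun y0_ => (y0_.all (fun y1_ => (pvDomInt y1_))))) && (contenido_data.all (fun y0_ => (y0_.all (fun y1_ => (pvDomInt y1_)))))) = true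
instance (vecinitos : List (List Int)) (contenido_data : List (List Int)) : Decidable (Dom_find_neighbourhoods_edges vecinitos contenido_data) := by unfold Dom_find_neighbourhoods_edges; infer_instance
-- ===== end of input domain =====

-- B replaces A's per-neighbourhood rescan of all edges by an inverted index (vertex -> set of
-- neighbourhood indices) built once, plus one pass over the edges updating a counts vector: faster.

-- ===== PORT A =====
def find_neighbourhoods_edges (vecinitos : List (List Int)) (contenido_data : List (List Int)) : List Int :=
  (PySem.List.pyRange 0 (vecinitos.length : Int) 1).foldl
    (fun acc i =>
      acc ++ [(PySem.List.pyRange 0 (contenido_data.length : Int) 1).foldl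
        (fun c k =>
          if PySem.List.pyGetD (PySem.List.pyGetD contenido_data k []) 0 0 ∈ PySem.List.pyGetD vecinitos i [] then
            if PySem.List.pyGetD (PySem.List.pyGetD contenido_data k []) 1 0 ∈ PySem.List.pyGetD vecinitos i [] then c + 1
            else c
          else c) 0])
    []

-- ===== PORT B =====
-- 'index.setdefault(v, set()).add(j)' = store (index.get(v, set())).add(j) back under v.
def fnIndex (vecinitos : List (List Int)) : PySem.Dict Int (PySem.Set Int) :=
  (PySem.List.enumerate vecinitos 0).foldl
    (fun d p => p.2.foldl (fun d v => d.insert v (PySem.Set.add (d.getD v PySem.Set.empty) p.1)) d)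
    PySem.Dict.empty

-- 'for j in su' iterates a Python set: exact here because the counts increments commute, so the
-- result does not depend on the iteration order.  counts[j] += 1 is ported via pySetD/pyGetD.
def find_neighbourhoods_edges_alt (vecinitos : List (List Int)) (contenido_data : List (List Int)) : List Int :=
  let index := fnIndex vecinitos
  contenido_data.foldl
    (fun counts edge =>
      let su := index.getD (PySem.List.pyGetD edge 0 0) PySem.Set.empty
      let sv := index.getD (PySem.List.pyGetD edge 1 0) PySem.Set.empty
      su.foldl (fun cs j =>
        if j ∈ sv then PySem.List.pySetD cs j (PySem.List.pyGetD cs j 0 + 1) else cs) counts)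
    (List.replicate vecinitos.length (0 : Int))

-- ===== PRECONDITION & SPEC =====
-- Pre_ excludes malformed edge rows with fewer than two entries: there A raises IndexError unless
-- every such lookup is short-circuited away, and B's unconditional edge[0]/edge[1] lookups raise.
def Pre_find_neighbourhoods_edges (vecinitos : List (List Int)) (contenido_data : List (List Int)) : Prop :=
  ∀ e ∈ contenido_data, 2 ≤ e.length

instance (vecinitos : List (List Int)) (contenido_data : List (List Int)) : Decidable (Pre_find_neighbourhoods_edges vecinitos contenido_data) := by unfold Pre_find_neighbourhoods_edges; infer_instance

def pvWitness_find_neighbourhoods_edges : List (List Int) × List (List Int) := ([[1, 2], [2, 3]], [[1, 2], [2, 3]])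

def Spec_find_neighbourhoods_edges (vecinitos : List (List Int)) (contenido_data : List (List Int)) (out : List Int) : Prop := out = find_neighbourhoods_edges_alt vecinitos contenido_data
instance (vecinitos : List (List Int)) (contenido_data : List (List Int)) (out : List Int) : Decidable (Spec_find_neighbourhoods_edges vecinitos contenido_data out) := by unfold Spec_find_neighbourhoods_edges; infer_instance

-- ===== CLAIM (what is proved, stated in full; the proofs are below) =====
def Claim_equal_find_neighbourhoods_edges : Prop := ∀ (vecinitos : List (List Int)) (contenido_data : List (List Int)), Dom_find_neighbourhoods_edges vecinitos contenido_data → Pre_find_neighbourhoods_edges vecinitos contenido_data → Spec_find_neighbourhoods_edges vecinitos contenido_data (find_neighbourhoods_edges vecinitos contenido_data)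

-- ===== LEMMAS AND PROOFS =====


-- A's inner loop is a count.
theorem fnA_inner (nb : List Int) (cont : List (List Int)) (c0 : Int) :
    cont.foldl (fun c e =>
      if PySem.List.pyGetD e 0 0 ∈ nb then
        (if PySem.List.pyGetD e 1 0 ∈ nb then c + 1 else c)
      else c) c0
    = c0 + (cont.countP (fun e => decide (PySem.List.pyGetD e 0 0 ∈ nb ∧ PySem.List.pyGetD e 1 0 ∈ nb)) : Int) := by
  induction cont generalizing c0 with
  | nil => simp
  | cons e t ih =>
    simp only [List.foldl_cons, List.countP_cons, ih]
    by_cases h0 : PySem.List.pyGetD e 0 0 ∈ nb <;> by_cases h1 : PySem.List.pyGetD e 1 0 ∈ nb <;>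
      simp [h0, h1] <;> push_cast <;> ring

-- A in normal form: one count per neighbourhood.
theorem fnA_eq (vecinitos contenido_data : List (List Int)) :
    find_neighbourhoods_edges vecinitos contenido_data
    = vecinitos.map (fun nb => (contenido_data.countP (fun e => decide (PySem.List.pyGetD e 0 0 ∈ nb ∧ PySem.List.pyGetD e 1 0 ∈ nb)) : Int)) := by
  unfold find_neighbourhoods_edges
  rw [PySem.List.foldl_pyRange_zero_pyGetD' vecinitos []
    (f := fun acc nb =>
      acc ++ [(PySem.List.pyRange 0 (contenido_data.length : Int) 1).foldl
        (fun c k =>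
          if PySem.List.pyGetD (PySem.List.pyGetD contenido_data k []) 0 0 ∈ nb then
            if PySem.List.pyGetD (PySem.List.pyGetD contenido_data k []) 1 0 ∈ nb then c + 1
            else c
          else c) 0]) (init := [])]
  rw [PySem.List.foldl_append_singleton_eq_map]
  simp only [List.nil_append]
  apply List.map_congr_left
  intro nb _
  rw [PySem.List.foldl_pyRange_zero_pyGetD' contenido_data []
    (f := fun c e =>
      if PySem.List.pyGetD e 0 0 ∈ nb then
        if PySem.List.pyGetD e 1 0 ∈ nb then c + 1 else c
      else c) (init := (0 : Int))]
  rw [fnA_inner]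
  simp

-- the inner index-building loop over one neighbourhood, membership in an entry
theorem mem_inner_fold (nb : List Int) (j0 v j : Int) (d : PySem.Dict Int (PySem.Set Int)) :
    j ∈ (nb.foldl (fun d v' => d.insert v' (PySem.Set.add (d.getD v' PySem.Set.empty) j0)) d).getD v PySem.Set.empty
    ↔ j ∈ d.getD v PySem.Set.empty ∨ (v ∈ nb ∧ j = j0) := by
  induction nb generalizing d with
  | nil => simp
  | cons v' t ih =>
    simp only [List.foldl_cons, ih, PySem.Dict.getD_insert]
    by_cases hv : v = v'
    · subst hv
      simp only [if_true, eq_self_iff_true, PySem.Set.mem_add, List.mem_cons]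
      tauto
    · simp only [List.mem_cons, hv, false_or]
      tauto

-- entries stay duplicate-free through the inner loop
theorem nodup_inner_fold (nb : List Int) (j0 : Int) (d : PySem.Dict Int (PySem.Set Int))
    (h : ∀ v, (d.getD v PySem.Set.empty).Nodup) :
    ∀ v, ((nb.foldl (fun d v' => d.insert v' (PySem.Set.add (d.getD v' PySem.Set.empty) j0)) d).getD v PySem.Set.empty).Nodup := by
  induction nb generalizing d with
  | nil => exact h
  | cons v' t ih =>
    simp only [List.foldl_cons]
    apply ih
    intro v
    rw [PySem.Dict.getD_insert]
    by_cases hv : v = v'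
    · simp only [hv, if_pos rfl]
      exact PySem.Set.nodup_add _ _ (h v')
    · simp only [if_neg hv]
      exact h v

-- the index built from position s onwards
def buildFrom (rest : List (List Int)) (s : Int) (d : PySem.Dict Int (PySem.Set Int)) : PySem.Dict Int (PySem.Set Int) :=
  (PySem.List.enumerate rest s).foldl
    (fun d p => p.2.foldl (fun d v => d.insert v (PySem.Set.add (d.getD v PySem.Set.empty) p.1)) d) d

theorem fnIndex_eq_buildFrom (vec : List (List Int)) : fnIndex vec = buildFrom vec 0 PySem.Dict.empty := rfl

theorem mem_buildFrom (rest : List (List Int)) (v j : Int) :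
    ∀ (s : Int) (d : PySem.Dict Int (PySem.Set Int)),
    (j ∈ (buildFrom rest s d).getD v PySem.Set.empty
    ↔ j ∈ d.getD v PySem.Set.empty ∨ ∃ n : Nat, n < rest.length ∧ j = s + (n : Int) ∧ v ∈ rest.getD n []) := by
  induction rest with
  | nil => simp [buildFrom]
  | cons nb t ih =>
    intro s d
    simp only [buildFrom, PySem.List.enumerate_cons, List.foldl_cons]
    rw [show ((PySem.List.enumerate t (s+1)).foldl _ _) = buildFrom t (s+1) (nb.foldl (fun d v' => d.insert v' (PySem.Set.add (d.getD v' PySem.Set.empty) s)) d) from rfl]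
    rw [ih, mem_inner_fold]
    constructor
    · rintro ((hd | ⟨hnb, rfl⟩) | ⟨n, hn, rfl, hv⟩)
      · exact Or.inl hd
      · exact Or.inr ⟨0, by simp, by simp, by simpa using hnb⟩
      · exact Or.inr ⟨n + 1, by simpa using hn, by push_cast; ring, by simpa using hv⟩
    · rintro (hd | ⟨n, hn, rfl, hv⟩)
      · exact Or.inl (Or.inl hd)
      · cases n with
        | zero => exact Or.inl (Or.inr ⟨by simpa using hv, by simp⟩)
        | succ m => exact Or.inr ⟨m, by simpa using hn, by push_cast; ring, by simpa using hv⟩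

theorem nodup_buildFrom (rest : List (List Int)) :
    ∀ (s : Int) (d : PySem.Dict Int (PySem.Set Int)),
    (∀ v, (d.getD v PySem.Set.empty).Nodup) →
    ∀ v, ((buildFrom rest s d).getD v PySem.Set.empty).Nodup := by
  induction rest with
  | nil => intro s d h; exact h
  | cons nb t ih =>
    intro s d h
    simp only [buildFrom, PySem.List.enumerate_cons, List.foldl_cons]
    exact ih (s+1) _ (nodup_inner_fold nb s d h)

theorem mem_fnIndex (vec : List (List Int)) (v j : Int) :
    j ∈ (fnIndex vec).getD v PySem.Set.empty ↔ ∃ n : Nat, n < vec.length ∧ j = (n : Int) ∧ v ∈ vec.getD n [] := by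
  rw [fnIndex_eq_buildFrom, mem_buildFrom]
  simp [PySem.Dict.getD_empty]

theorem nodup_fnIndex (vec : List (List Int)) (v : Int) : ((fnIndex vec).getD v PySem.Set.empty).Nodup := by
  rw [fnIndex_eq_buildFrom]
  exact nodup_buildFrom vec 0 PySem.Dict.empty (by simp [PySem.Dict.getD_empty]) v

-- the counting pass: incrementing along one (duplicate-free, in-bounds) index set
theorem inc_fold (sv : List Int) (s : List Int) :
    ∀ (cs : List Int), s.Nodup → (∀ x ∈ s, 0 ≤ x ∧ x.toNat < cs.length) →
    ((s.foldl (fun cs j => if j ∈ sv then PySem.List.pySetD cs j (PySem.List.pyGetD cs j 0 + 1) else cs) cs).length = cs.length ∧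
     ∀ i : Nat, i < cs.length →
       (s.foldl (fun cs j => if j ∈ sv then PySem.List.pySetD cs j (PySem.List.pyGetD cs j 0 + 1) else cs) cs).getD i 0
       = cs.getD i 0 + (if ((i : Int) ∈ s ∧ (i : Int) ∈ sv) then 1 else 0)) := by
  induction s with
  | nil => intro cs _ _; simp
  | cons j t ih =>
    intro cs hnd hb
    have hj := hb j (by simp)
    have hlen : (if j ∈ sv then PySem.List.pySetD cs j (PySem.List.pyGetD cs j 0 + 1) else cs).length = cs.length := by
      split <;> simp [PySem.List.length_pySetD]
    have hb' : ∀ x ∈ t, 0 ≤ x ∧ x.toNat < (if j ∈ sv then PySem.List.pySetD cs j (PySem.List.pyGetD cs j 0 + 1) else cs).length := by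
      intro x hx; rw [hlen]; exact hb x (by simp [hx])
    obtain ⟨ihlen, ihget⟩ := ih _ (List.Nodup.of_cons hnd) hb'
    constructor
    · simp only [List.foldl_cons]; rw [ihlen, hlen]
    · intro i hi
      simp only [List.foldl_cons]
      rw [ihget i (by rw [hlen]; exact hi)]
      have hjt : j ∉ t := (List.nodup_cons.mp hnd).1
      have hset : (if j ∈ sv then PySem.List.pySetD cs j (PySem.List.pyGetD cs j 0 + 1) else cs).getD i 0
          = cs.getD i 0 + (if ((i : Int) = j ∧ j ∈ sv) then 1 else 0) := by
        by_cases hsv : j ∈ sv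
        · simp only [if_pos hsv]
          rw [PySem.List.pySetD_of_nonneg _ _ hj.1, PySem.List.pyGetD_eq_getElem _ _ hj.1 (by omega)]
          by_cases hij : (i : Int) = j
          · have hji : j.toNat = i := by omega
            subst hji
            simp [List.getD_eq_getElem?_getD, List.getElem?_set, hj.2, hsv, hij,
              List.getElem?_eq_getElem hj.2, Int.toNat_of_nonneg hj.1]
          · have hne : j.toNat ≠ i := by omega
            simp [List.getD_eq_getElem?_getD, List.getElem?_set, hne, hij]
        · simp [hsv]
      rw [hset]
      by_cases hij : (i : Int) = j
      · have hit : (i : Int) ∉ t := by rw [hij]; exact hjt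
        have h1 : ((i : Int) ∈ t ∧ (i : Int) ∈ sv) ↔ False := by simp [hit]
        have h2 : ((i : Int) ∈ j :: t ∧ (i : Int) ∈ sv) ↔ j ∈ sv := by simp [hij]
        have h3 : ((i : Int) = j ∧ j ∈ sv) ↔ j ∈ sv := by simp [hij]
        simp only [h1, h2, h3, if_false]
        split <;> omega
      · have : ((i : Int) ∈ j :: t) ↔ ((i : Int) ∈ t) := by simp [hij]
        simp only [this]
        split <;> split <;> omega

-- the pass over the edges
theorem edges_fold (vec : List (List Int)) (cont : List (List Int)) :
    ∀ (cs : List Int), cs.length = vec.length →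
    (cont.foldl (fun counts edge =>
        ((fnIndex vec).getD (PySem.List.pyGetD edge 0 0) PySem.Set.empty).foldl
          (fun cs j => if j ∈ (fnIndex vec).getD (PySem.List.pyGetD edge 1 0) PySem.Set.empty then PySem.List.pySetD cs j (PySem.List.pyGetD cs j 0 + 1) else cs) counts) cs).length = vec.length ∧
     ∀ i : Nat, i < vec.length →
       (cont.foldl (fun counts edge =>
        ((fnIndex vec).getD (PySem.List.pyGetD edge 0 0) PySem.Set.empty).foldl
          (fun cs j => if j ∈ (fnIndex vec).getD (PySem.List.pyGetD edge 1 0) PySem.Set.empty then PySem.List.pySetD cs j (PySem.List.pyGetD cs j 0 + 1) else cs) counts) cs).getD i 0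
       = cs.getD i 0 + (cont.countP (fun e => decide ((i : Int) ∈ (fnIndex vec).getD (PySem.List.pyGetD e 0 0) PySem.Set.empty ∧ (i : Int) ∈ (fnIndex vec).getD (PySem.List.pyGetD e 1 0) PySem.Set.empty)) : Int) := by
  induction cont with
  | nil => intro cs h; simp [h]
  | cons e t ih =>
    intro cs h
    have hb : ∀ x ∈ (fnIndex vec).getD (PySem.List.pyGetD e 0 0) PySem.Set.empty, 0 ≤ x ∧ x.toNat < cs.length := by
      intro x hx
      obtain ⟨n, hn, rfl, _⟩ := (mem_fnIndex vec _ x).mp hx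
      constructor
      · exact Int.natCast_nonneg n
      · simpa [h] using hn
    obtain ⟨slen, sget⟩ := inc_fold ((fnIndex vec).getD (PySem.List.pyGetD e 1 0) PySem.Set.empty)
      ((fnIndex vec).getD (PySem.List.pyGetD e 0 0) PySem.Set.empty) cs (nodup_fnIndex vec _) hb
    obtain ⟨ihlen, ihget⟩ := ih _ (by rw [slen, h])
    refine ⟨by simpa using ihlen, ?_⟩
    intro i hi
    simp only [List.foldl_cons]
    rw [ihget i hi, sget i (by omega), List.countP_cons]
    by_cases hc : ((i : Int) ∈ (fnIndex vec).getD (PySem.List.pyGetD e 0 0) PySem.Set.empty ∧ (i : Int) ∈ (fnIndex vec).getD (PySem.List.pyGetD e 1 0) PySem.Set.empty)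
    · rw [if_pos hc, decide_eq_true hc]
      simp only [if_true]
      push_cast; ring
    · rw [if_neg hc, decide_eq_false hc]
      push_cast; ring

-- ===== VERDICT (by name: the statement is the Claim_ definition above) =====
theorem find_neighbourhoods_edges_spec : Claim_equal_find_neighbourhoods_edges := by
  intro vecinitos contenido_data _ _
  unfold Spec_find_neighbourhoods_edges
  rw [fnA_eq]
  show _ = find_neighbourhoods_edges_alt vecinitos contenido_data
  unfold find_neighbourhoods_edges_alt
  obtain ⟨hlen, hget⟩ := edges_fold vecinitos contenido_data (List.replicate vecinitos.length (0 : Int)) (by simp)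
  apply List.ext_getElem
  · simpa using hlen.symm
  · intro i hi1 hi2
    have hiv : i < vecinitos.length := by simpa using hi1
    have h1 : (vecinitos.map (fun nb => (contenido_data.countP (fun e => decide (PySem.List.pyGetD e 0 0 ∈ nb ∧ PySem.List.pyGetD e 1 0 ∈ nb)) : Int)))[i] = (contenido_data.countP (fun e => decide (PySem.List.pyGetD e 0 0 ∈ vecinitos[i] ∧ PySem.List.pyGetD e 1 0 ∈ vecinitos[i])) : Int) := by
      simp
    rw [h1]
    have h2 := hget i hiv
    rw [List.getD_eq_getElem?_getD, List.getElem?_eq_getElem hi2] at h2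
    simp only [Option.getD_some] at h2
    rw [h2]
    have hrep : (List.replicate vecinitos.length (0 : Int)).getD i 0 = 0 := by
      simp [List.getD_eq_getElem?_getD, hiv]
    rw [hrep, zero_add]
    congr 1
    apply List.countP_congr
    intro e _
    simp only [decide_eq_true_eq]
    have hmem : ∀ v : Int, ((i : Int) ∈ (fnIndex vecinitos).getD v PySem.Set.empty ↔ v ∈ vecinitos[i]) := by
      intro v
      rw [mem_fnIndex]
      constructor
      · rintro ⟨n, hn, hni, hv⟩
        have : n = i := by omega
        subst this
        simpa [List.getD_eq_getElem?_getD, List.getElem?_eq_getElem hiv] using hv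
      · intro hv
        exact ⟨i, hiv, rfl, by simpa [List.getD_eq_getElem?_getD, List.getElem?_eq_getElem hiv] using hv⟩
    constructor
    · rintro ⟨ha, hb⟩; exact ⟨(hmem _).mpr ha, (hmem _).mpr hb⟩
    · rintro ⟨ha, hb⟩; exact ⟨(hmem _).mp ha, (hmem _).mp hb⟩
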